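-- pv_equiv track=rewrite | github.com/SlaughterBrute/gamgam | generate_map.py | generate_hitomezashi_pattern
-- ===== SOURCE A (Python) =====
-- def generate_hitomezashi_pattern(row_sequence, col_sequence):
--     first_col = [0]
--
--     for i, x in enumerate(row_sequence):
--         value = (first_col[i] + col_sequence[i]) % 2
--         first_col.append(value)
--
--     grid = []
--
--     for y, y0 in enumerate(first_col):
--         row = []
--         row.append(y0)
--         for x, x0 in enumerate(row_sequence):
--             value = (row[x] + x0 + y) % 2
--             row.append(value)
--         grid.append(row)
--
--     return grid
-- ===== SOURCE B (Python) =====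
-- def generate_hitomezashi_pattern(row_sequence, col_sequence):
--     n = len(row_sequence)
--     cumcol = [0]
--     p = 0
--     for i in range(n):
--         p = (p + col_sequence[i]) % 2
--         cumcol.append(p)
--     cumrow = [0]
--     q = 0
--     for x in range(n):
--         q = (q + row_sequence[x]) % 2
--         cumrow.append(q)
--     return [[(cumcol[y] + cumrow[x] + x * y) % 2 for x in range(n + 1)]
--             for y in range(n + 1)]
-- ===== Notes on version B (the rewrite author's own statement) =====
-- stated objective: alternative
-- what changed: Replaces the left-neighbor recurrence that fills each row cell-by-cell with two running-parity prefix arrays plus a per-cell closed form (cumcol[y] + cumrow[x] + x*y) % 2.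
import Mathlib
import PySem

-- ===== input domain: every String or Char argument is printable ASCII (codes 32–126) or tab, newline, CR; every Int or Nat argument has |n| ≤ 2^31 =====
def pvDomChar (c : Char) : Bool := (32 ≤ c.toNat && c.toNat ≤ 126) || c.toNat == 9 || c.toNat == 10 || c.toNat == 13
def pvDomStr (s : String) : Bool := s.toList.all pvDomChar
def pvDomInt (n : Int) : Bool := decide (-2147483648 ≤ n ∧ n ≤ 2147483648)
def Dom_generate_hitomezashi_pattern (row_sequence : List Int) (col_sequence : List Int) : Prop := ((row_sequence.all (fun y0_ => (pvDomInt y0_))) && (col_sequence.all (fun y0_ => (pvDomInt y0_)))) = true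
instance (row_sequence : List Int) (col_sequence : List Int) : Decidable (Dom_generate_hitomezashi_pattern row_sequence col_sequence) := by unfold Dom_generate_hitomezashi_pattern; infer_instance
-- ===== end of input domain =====

-- B replaces A's left-neighbor cell recurrence by two running-parity prefix arrays and a
-- per-cell closed form (cumcol[y] + cumrow[x] + x*y) % 2; same asymptotic cost, different structure.

-- ===== PORT A =====
-- Python's col_sequence[i] raises IndexError when col_sequence is shorter than row_sequence;
-- that read is totalized here with default 0 and those inputs are excluded by Pre_.
def generate_hitomezashi_pattern (row_sequence : List Int) (col_sequence : List Int) : List (List Int) :=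
  let first_col := (PySem.List.enumerate row_sequence).foldl
    (fun fc p =>
      let value := PySem.Int.mod (PySem.List.pyGetD fc p.1 0 + PySem.List.pyGetD col_sequence p.1 0) 2
      fc ++ [value]) [0]
  let grid := (PySem.List.enumerate first_col).foldl
    (fun g q =>
      let row := (PySem.List.enumerate row_sequence).foldl
        (fun r p =>
          let value := PySem.Int.mod (PySem.List.pyGetD r p.1 0 + p.2 + q.1) 2
          r ++ [value]) [q.2]
      g ++ [row]) []
  grid

-- ===== PORT B =====
-- same totalization of the (Pre_-excluded) IndexError on col_sequence[i]
def generate_hitomezashi_pattern_alt (row_sequence : List Int) (col_sequence : List Int) : List (List Int) :=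
  let n := row_sequence.length
  let cc := (List.range n).foldl
    (fun (s : List Int × Int) (i : Nat) =>
      let p := PySem.Int.mod (s.2 + PySem.List.pyGetD col_sequence (i : Int) 0) 2
      (s.1 ++ [p], p)) ([0], 0)
  let cr := (List.range n).foldl
    (fun (s : List Int × Int) (x : Nat) =>
      let q := PySem.Int.mod (s.2 + PySem.List.pyGetD row_sequence (x : Int) 0) 2
      (s.1 ++ [q], q)) ([0], 0)
  (List.range (n + 1)).map (fun y =>
    (List.range (n + 1)).map (fun x =>
      PySem.Int.mod (cc.1.getD y 0 + cr.1.getD x 0 + (x : Int) * (y : Int)) 2))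

-- ===== PRECONDITION & SPEC =====
-- Pre_ excludes exactly the inputs where Python A raises IndexError (col_sequence[i] with
-- row_sequence longer than col_sequence); B raises there too.
def Pre_generate_hitomezashi_pattern (row_sequence : List Int) (col_sequence : List Int) : Prop :=
  row_sequence.length ≤ col_sequence.length
instance (row_sequence : List Int) (col_sequence : List Int) : Decidable (Pre_generate_hitomezashi_pattern row_sequence col_sequence) := by unfold Pre_generate_hitomezashi_pattern; infer_instance

def pvWitness_generate_hitomezashi_pattern : List Int × List Int := ([1, 0, 1], [0, 1, 1])

def Spec_generate_hitomezashi_pattern (row_sequence : List Int) (col_sequence : List Int) (out : List (List Int)) : Prop := out = generate_hitomezashi_pattern_alt row_sequence col_sequence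
instance (row_sequence : List Int) (col_sequence : List Int) (out : List (List Int)) : Decidable (Spec_generate_hitomezashi_pattern row_sequence col_sequence out) := by unfold Spec_generate_hitomezashi_pattern; infer_instance

-- ===== CLAIM (what is proved, stated in full; the proofs are below) =====
def Claim_equal_generate_hitomezashi_pattern : Prop := ∀ (row_sequence : List Int) (col_sequence : List Int), Dom_generate_hitomezashi_pattern row_sequence col_sequence → Pre_generate_hitomezashi_pattern row_sequence col_sequence → Spec_generate_hitomezashi_pattern row_sequence col_sequence (generate_hitomezashi_pattern row_sequence col_sequence)

-- ===== LEMMAS AND PROOFS =====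

-- enumerate as a map over range
lemma pv_enum (xs : List Int) (s : Int) :
    PySem.List.enumerate xs s
      = (List.range xs.length).map (fun (i : Nat) => (s + (i : Int), xs.getD i 0)) := by
  induction xs generalizing s with
  | nil => simp [PySem.List.enumerate]
  | cons a t ih =>
      rw [List.length_cons, List.range_succ_eq_map]
      simp only [PySem.List.enumerate, ih, List.map_cons, List.map_map]
      refine List.cons_eq_cons.mpr ⟨by simp, ?_⟩
      apply List.map_congr_left
      intro i _
      simp only [Function.comp_apply, List.getD_cons_succ, Prod.mk.injEq]
      constructor
      · push_cast; ring
      · trivial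

-- running parity of the first k elements (each step reduced mod 2, like both programs)
def pvPar (xs : List Int) : Nat → Int
  | 0 => 0
  | k + 1 => PySem.Int.mod (pvPar xs k + xs.getD k 0) 2

lemma pvPar_01 (xs : List Int) (k : Nat) : pvPar xs k = 0 ∨ pvPar xs k = 1 := by
  cases k with
  | zero => left; rfl
  | succ k =>
      have h1 := PySem.Int.mod_nonneg (pvPar xs k + xs.getD k 0) (b := 2) (by norm_num)
      have h2 := PySem.Int.mod_lt (pvPar xs k + xs.getD k 0) (b := 2) (by norm_num)
      unfold pvPar
      omega

-- B's prefix-array fold computes the parity table and its last entry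
lemma pv_foldB (xs : List Int) (m : Nat) :
    (List.range m).foldl
      (fun (s : List Int × Int) (i : Nat) =>
        let p := PySem.Int.mod (s.2 + PySem.List.pyGetD xs (i : Int) 0) 2
        (s.1 ++ [p], p)) ([0], 0)
    = ((List.range (m + 1)).map (fun k => pvPar xs k), pvPar xs m) := by
  induction m with
  | zero => simp [pvPar]
  | succ m ih =>
      rw [List.range_succ, List.foldl_append, ih]
      simp only [List.foldl_cons, List.foldl_nil, PySem.List.pyGetD_natCast]
      rw [List.range_succ (n := m + 1), List.map_append]
      simp [pvPar]

-- A's first_col fold computes the same parity table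
lemma pv_foldA1 (col : List Int) (m : Nat) :
    (List.range m).foldl
      (fun fc (i : Nat) => fc ++ [PySem.Int.mod (fc.getD i 0 + col.getD i 0) 2]) [0]
    = (List.range (m + 1)).map (fun k => pvPar col k) := by
  induction m with
  | zero => simp [pvPar]
  | succ m ih =>
      rw [List.range_succ, List.foldl_append, ih]
      simp only [List.foldl_cons, List.foldl_nil]
      rw [PySem.List.getD_map_range (fun k => pvPar col k) (m + 1) m 0 (by omega)]
      rw [List.range_succ (n := m + 1), List.map_append]
      simp [pvPar]

-- A's inner row recurrence
def pvRow (rs : List Int) (y0 : Int) (y : Int) : Nat → Int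
  | 0 => y0
  | x + 1 => PySem.Int.mod (pvRow rs y0 y x + rs.getD x 0 + y) 2

lemma pv_foldRow (rs : List Int) (y0 y : Int) (m : Nat) :
    (List.range m).foldl
      (fun r (x : Nat) => r ++ [PySem.Int.mod (r.getD x 0 + rs.getD x 0 + y) 2]) [y0]
    = (List.range (m + 1)).map (pvRow rs y0 y) := by
  induction m with
  | zero => simp [pvRow]
  | succ m ih =>
      rw [List.range_succ, List.foldl_append, ih]
      simp only [List.foldl_cons, List.foldl_nil]
      rw [PySem.List.getD_map_range (pvRow rs y0 y) (m + 1) m 0 (by omega)]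
      rw [List.range_succ (n := m + 1), List.map_append]
      simp [pvRow]

-- the closed form B uses for each cell
lemma pv_row_closed (rs : List Int) (y0 : Int) (y : Nat) (h : y0 = 0 ∨ y0 = 1) (x : Nat) :
    pvRow rs y0 (y : Int) x
      = PySem.Int.mod (y0 + pvPar rs x + (x : Int) * (y : Int)) 2 := by
  induction x with
  | zero =>
      simp only [pvRow, pvPar, Nat.cast_zero, zero_mul, add_zero,
        PySem.Int.mod_eq_emod_of_pos (show (0:Int) < 2 by norm_num)]
      rcases h with h | h <;> simp [h]
  | succ x ih =>
      unfold pvRow pvPar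
      rw [ih]
      have hxy : (((x + 1 : Nat)) : Int) * (y : Int) = (x : Int) * (y : Int) + (y : Int) := by
        push_cast; ring
      rw [hxy]
      simp only [PySem.Int.mod_eq_emod_of_pos (show (0:Int) < 2 by norm_num)]
      generalize (x : Int) * (y : Int) = t
      omega

-- A in normal form
lemma pvA_eq (rs cs : List Int) :
    generate_hitomezashi_pattern rs cs
      = (List.range (rs.length + 1)).map (fun y =>
          (List.range (rs.length + 1)).map (pvRow rs (pvPar cs y) (y : Int))) := by
  simp only [generate_hitomezashi_pattern]
  rw [pv_enum rs 0, List.foldl_map]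
  simp only [zero_add, PySem.List.pyGetD_natCast]
  rw [pv_foldA1 cs rs.length]
  rw [pv_enum _ 0, List.foldl_map]
  simp only [zero_add, List.length_map, List.length_range]
  rw [PySem.List.foldl_append_singleton_eq_map]
  simp only [List.nil_append]
  apply List.map_congr_left
  intro y hy
  rw [PySem.List.getD_map_range (fun k => pvPar cs k) (rs.length + 1) y 0
    (List.mem_range.mp hy)]
  rw [List.foldl_map]
  simp only [PySem.List.pyGetD_natCast]
  exact pv_foldRow rs (pvPar cs y) (y : Int) rs.length

-- ===== VERDICT (by name: the statement is the Claim_ definition above) =====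
theorem generate_hitomezashi_pattern_spec : Claim_equal_generate_hitomezashi_pattern := by
  intro rs cs _ _
  unfold Spec_generate_hitomezashi_pattern
  rw [pvA_eq]
  simp only [generate_hitomezashi_pattern_alt]
  rw [pv_foldB cs rs.length, pv_foldB rs rs.length]
  apply List.map_congr_left
  intro y hy
  apply List.map_congr_left
  intro x hx
  rw [PySem.List.getD_map_range (fun k => pvPar cs k) (rs.length + 1) y 0 (List.mem_range.mp hy)]
  rw [PySem.List.getD_map_range (fun k => pvPar rs k) (rs.length + 1) x 0 (List.mem_range.mp hx)]
  exact pv_row_closed rs (pvPar cs y) y (pvPar_01 cs y) x
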